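-- pv_equiv track=rewrite | github.com/xiaobingling93-pixel/Ascend-mstt | debug/accuracy_tools/msprobe/mindspore/compare/modify_mapping.py | find_regard_scope
-- ===== SOURCE A (Python) =====
-- def find_regard_scope(lines, start_sign, end_sign):
--     # 找出 start_pos 和 end_pos
--     start_pos = end_pos = -1
--     for idx, ii in enumerate(lines):
--         if start_sign in ii:
--             start_pos = idx
--         elif end_sign in ii:
--             end_pos = idx
--             break
--     return start_pos, end_pos
-- ===== SOURCE B (Python) =====
-- def find_regard_scope(lines, start_sign, end_sign):
--     # two independent searches: the first end-marker line, then the last start-marker line before it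
--     end_pos = next((i for i, line in enumerate(lines) if end_sign in line), -1)
--     scope = lines if end_pos == -1 else lines[:end_pos]
--     start_pos = next((j for j in reversed(range(len(scope))) if start_sign in scope[j]), -1)
--     return start_pos, end_pos
-- ===== Notes on version B (the rewrite author's own statement) =====
-- stated objective: alternative
-- what changed: Replaces A's fused single pass with mutable state and break by two independent searches (first end-marker line, then last start-marker line before it); Pre_ excludes inputs where some line contains both markers, on which A's elif makes such a line count only as a start -- an accidental tie-break neither value specifies.
-- outside the precondition, e.g. on find_regard_scope(['se'], 's', 'e'): A returns (0, -1), B returns (-1, 0)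
import Mathlib
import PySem

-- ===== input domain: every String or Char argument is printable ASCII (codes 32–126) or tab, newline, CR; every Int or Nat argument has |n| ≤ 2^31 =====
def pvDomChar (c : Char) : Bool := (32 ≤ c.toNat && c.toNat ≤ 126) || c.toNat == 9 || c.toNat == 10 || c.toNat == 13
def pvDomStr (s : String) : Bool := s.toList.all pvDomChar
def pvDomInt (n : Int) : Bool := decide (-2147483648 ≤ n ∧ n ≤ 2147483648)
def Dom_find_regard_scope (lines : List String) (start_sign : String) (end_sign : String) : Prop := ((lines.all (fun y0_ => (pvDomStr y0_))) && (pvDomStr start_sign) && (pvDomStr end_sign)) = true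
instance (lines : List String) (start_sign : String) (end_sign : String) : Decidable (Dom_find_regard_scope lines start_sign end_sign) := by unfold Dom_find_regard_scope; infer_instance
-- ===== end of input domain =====

-- B replaces A's fused single loop (state + break) by two independent searches (first end-marker line, then the last start-marker line before it); objective: alternative decomposition.

-- ===== PORT A =====
-- the for-loop of A: state (idx, start_pos); break returns immediately
def findRegardLoopA (ss es : String) : List String → Int → Int → Int × Int
  | [], _, sp => (sp, -1)
  | l :: rest, idx, sp =>
    if PySem.Str.isIn ss l then findRegardLoopA ss es rest (idx + 1) idx
    else if PySem.Str.isIn es l then (sp, idx)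
    else findRegardLoopA ss es rest (idx + 1) sp

def find_regard_scope (lines : List String) (start_sign : String) (end_sign : String) : Int × Int :=
  findRegardLoopA start_sign end_sign lines 0 (-1)

-- ===== PORT B =====
-- Source B's first search: first index whose line contains end_sign, else -1
def findEndB (es : String) : List String → Int → Int
  | [], _ => -1
  | l :: rest, i => if PySem.Str.isIn es l then i else findEndB es rest (i + 1)

-- Source B's second search: j over reversed(range(len(scope))), stop at first hit; fuel = j+1
def lastStartB (ss : String) (scope : List String) : Nat → Int
  | 0 => -1
  | j + 1 => if PySem.Str.isIn ss (scope.getD j "") then (j : Int) else lastStartB ss scope j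

def find_regard_scope_alt (lines : List String) (start_sign : String) (end_sign : String) : Int × Int :=
  let end_pos := findEndB end_sign lines 0
  let scope := if end_pos = -1 then lines else PySem.List.slice lines none (some end_pos)
  (lastStartB start_sign scope scope.length, end_pos)

-- ===== PRECONDITION & SPEC =====
-- Pre_ excludes inputs where some line contains BOTH markers: there A's elif makes such a line
-- count only as a start (an accidental tie-break of the fused loop), while B's independent end
-- search counts it as an end; either reading is defensible, so those inputs are excluded.
def Pre_find_regard_scope (lines : List String) (start_sign : String) (end_sign : String) : Prop :=
  lines.all (fun l => !(PySem.Str.isIn start_sign l && PySem.Str.isIn end_sign l)) = true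
instance (lines : List String) (start_sign : String) (end_sign : String) : Decidable (Pre_find_regard_scope lines start_sign end_sign) := by unfold Pre_find_regard_scope; infer_instance

def pvWitness_find_regard_scope : List String × String × String := (["start here", "middle", "end here"], "start", "end")

def Spec_find_regard_scope (lines : List String) (start_sign : String) (end_sign : String) (out : Int × Int) : Prop := out = find_regard_scope_alt lines start_sign end_sign
instance (lines : List String) (start_sign : String) (end_sign : String) (out : Int × Int) : Decidable (Spec_find_regard_scope lines start_sign end_sign out) := by unfold Spec_find_regard_scope; infer_instance

-- ===== CLAIM (what is proved, stated in full; the proofs are below) =====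
def Claim_equal_find_regard_scope : Prop := ∀ (lines : List String) (start_sign : String) (end_sign : String), Dom_find_regard_scope lines start_sign end_sign → Pre_find_regard_scope lines start_sign end_sign → Spec_find_regard_scope lines start_sign end_sign (find_regard_scope lines start_sign end_sign)

-- ===== LEMMAS AND PROOFS =====

-- first index with end_sign in line and start_sign not in line (relative) — characterises A's break
def fe (ss es : String) : List String → Option Nat
  | [] => none
  | l :: rest =>
    if PySem.Str.isIn es l && !PySem.Str.isIn ss l then some 0
    else (fe ss es rest).map (· + 1)

-- first index with end_sign in line (relative) — characterises B's end search
def fe' (es : String) : List String → Option Nat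
  | [] => none
  | l :: rest =>
    if PySem.Str.isIn es l then some 0
    else (fe' es rest).map (· + 1)

-- last index with start_sign in line (relative)
def ls (ss : String) : List String → Option Nat
  | [] => none
  | l :: rest =>
    (ls ss rest).elim (if PySem.Str.isIn ss l then some 0 else none) (fun j => some (j + 1))

theorem fe'_eq_fe (ss es : String) : ∀ (lines : List String),
    (∀ l ∈ lines, ¬(PySem.Str.isIn ss l = true ∧ PySem.Str.isIn es l = true)) →
    fe' es lines = fe ss es lines := by
  intro lines
  induction lines with
  | nil => intro _; rfl
  | cons l rest ih =>
    intro h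
    have hrest := ih (fun x hx => h x (List.mem_cons_of_mem l hx))
    by_cases he : PySem.Str.isIn es l = true
    · have hs : PySem.Str.isIn ss l = false := by
        rcases Bool.eq_false_or_eq_true (PySem.Str.isIn ss l) with h1 | h0
        · exact absurd ⟨h1, he⟩ (h l (by simp))
        · exact h0
      simp only [fe', fe, he, hs]
      rfl
    · have he' : PySem.Str.isIn es l = false := Bool.eq_false_iff.mpr he
      simp only [fe', fe, he', Bool.false_and, Bool.false_eq_true, if_false, hrest]

theorem loopA_char (ss es : String) : ∀ (lines : List String) (idx sp : Int),
    findRegardLoopA ss es lines idx sp =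
      ((ls ss (lines.take ((fe ss es lines).getD lines.length))).elim sp (fun j => idx + (j : Int)),
       (fe ss es lines).elim (-1) (fun e => idx + (e : Int))) := by
  intro lines
  induction lines with
  | nil =>
    intro idx sp
    simp only [findRegardLoopA, fe, ls, List.take_nil, Option.getD_none, Option.elim_none]
  | cons l rest ih =>
    intro idx sp
    by_cases h1 : PySem.Str.isIn ss l = true
    · have hc : (PySem.Str.isIn es l && !PySem.Str.isIn ss l) = false := by
        simp only [h1, Bool.not_true, Bool.and_false]
      simp only [findRegardLoopA, fe, ls]
      rw [if_pos h1, if_neg (by simp only [hc]; exact Bool.false_ne_true), ih]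
      rcases hfe : fe ss es rest with _ | e
      · simp only [hfe, Option.map_none, Option.getD_none, Option.elim_none, List.length_cons,
          List.take_succ_cons, List.take_length, ls]
        rcases hls : ls ss rest with _ | j
        · simp only [hls, Option.elim_none]
          rw [if_pos h1]
          simp only [Option.elim_some, Nat.cast_zero, add_zero]
        · simp only [hls, Option.elim_some]
          rw [Prod.mk.injEq]
          constructor
          · push_cast; ring
          · rfl
      · simp only [hfe, Option.map_some, Option.getD_some, Option.elim_some,
          List.take_succ_cons, ls]
        rcases hls : ls ss (rest.take e) with _ | j
        · simp only [hls, Option.elim_none]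
          rw [if_pos h1]
          rw [Prod.mk.injEq]
          constructor
          · simp only [Option.elim_some, Nat.cast_zero, add_zero]
          · push_cast; ring
        · simp only [hls, Option.elim_some]
          rw [Prod.mk.injEq]
          constructor
          · push_cast; ring
          · push_cast; ring
    · have h1' : PySem.Str.isIn ss l = false := Bool.eq_false_iff.mpr h1
      by_cases h2 : PySem.Str.isIn es l = true
      · have hc : (PySem.Str.isIn es l && !PySem.Str.isIn ss l) = true := by
          rw [h2, h1']; rfl
        simp only [findRegardLoopA, fe, ls]
        rw [if_neg h1, if_pos h2, if_pos hc]
        simp only [Option.getD_some, List.take_zero, ls, Option.elim_none, Option.elim_some,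
          Nat.cast_zero, add_zero]
      · have h2' : PySem.Str.isIn es l = false := Bool.eq_false_iff.mpr h2
        have hc : (PySem.Str.isIn es l && !PySem.Str.isIn ss l) = false := by
          rw [h2']; rfl
        simp only [findRegardLoopA, fe, ls]
        rw [if_neg h1, if_neg h2, if_neg (by simp only [hc]; exact Bool.false_ne_true), ih]
        rcases hfe : fe ss es rest with _ | e
        · simp only [hfe, Option.map_none, Option.getD_none, Option.elim_none, List.length_cons,
            List.take_succ_cons, List.take_length, ls]
          rcases hls : ls ss rest with _ | j
          · simp only [hls, Option.elim_none]
            rw [if_neg h1]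
            simp only [Option.elim_none]
          · simp only [hls, Option.elim_some]
            rw [Prod.mk.injEq]
            constructor
            · push_cast; ring
            · rfl
        · simp only [hfe, Option.map_some, Option.getD_some, Option.elim_some,
            List.take_succ_cons, ls]
          rcases hls : ls ss (rest.take e) with _ | j
          · simp only [hls, Option.elim_none]
            rw [if_neg h1]
            rw [Prod.mk.injEq]
            constructor
            · rfl
            · push_cast; ring
          · simp only [hls, Option.elim_some]
            rw [Prod.mk.injEq]
            constructor
            · push_cast; ring
            · push_cast; ring

theorem findEndB_char (es : String) : ∀ (lines : List String) (i : Int),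
    findEndB es lines i = (fe' es lines).elim (-1) (fun e => i + (e : Int)) := by
  intro lines
  induction lines with
  | nil => intro i; simp only [findEndB, fe', Option.elim_none]
  | cons l rest ih =>
    intro i
    by_cases hc : PySem.Str.isIn es l = true
    · simp only [findEndB, fe']
      rw [if_pos hc, if_pos hc]
      simp only [Option.elim_some, Nat.cast_zero, add_zero]
    · simp only [findEndB, fe']
      rw [if_neg hc, if_neg hc, ih]
      rcases hfe : fe' es rest with _ | e
      · simp only [hfe, Option.map_none, Option.elim_none]
      · simp only [hfe, Option.map_some, Option.elim_some]
        push_cast; ring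

theorem ls_append (ss l : String) : ∀ (xs : List String),
    ls ss (xs ++ [l]) = if PySem.Str.isIn ss l then some xs.length else ls ss xs := by
  intro xs
  induction xs with
  | nil => simp only [List.nil_append, ls, Option.elim_none, List.length_nil]
  | cons x t ih =>
    simp only [List.cons_append, ls, ih]
    by_cases h : PySem.Str.isIn ss l = true
    · rw [if_pos h, if_pos h]
      rcases ht : ls ss t with _ | j <;>
        simp only [Option.elim_some, List.length_cons]
    · rw [if_neg h, if_neg h]

theorem lastStartB_append (ss l : String) : ∀ (n : Nat) (ys : List String), n ≤ ys.length →
    lastStartB ss (ys ++ [l]) n = lastStartB ss ys n := by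
  intro n
  induction n with
  | zero => intro ys _; rfl
  | succ j ih =>
    intro ys hj
    have hget : (ys ++ [l]).getD j "" = ys.getD j "" := by
      simp only [List.getD, List.getElem?_append_left (by omega : j < ys.length)]
    simp only [lastStartB, hget, ih ys (by omega)]

theorem lastStartB_char (ss : String) : ∀ (scope : List String),
    lastStartB ss scope scope.length = (ls ss scope).elim (-1) (fun j => (j : Int)) := by
  intro scope
  induction scope using List.reverseRecOn with
  | nil => rfl
  | append_singleton ys l ih =>
    have hget : (ys ++ [l]).getD ys.length "" = l := by
      simp only [List.getD, List.getElem?_append_right (le_refl ys.length), Nat.sub_self,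
        List.getElem?_cons_zero, Option.getD_some]
    rw [(by simp : (ys ++ [l]).length = ys.length + 1)]
    by_cases h : PySem.Str.isIn ss l = true
    · simp only [lastStartB, hget]
      rw [if_pos h, ls_append, if_pos h]
      simp only [Option.elim_some]
    · simp only [lastStartB, hget]
      rw [if_neg h, lastStartB_append ss l ys.length ys (le_refl _), ih, ls_append, if_neg h]

-- ===== VERDICT (by name: the statement is the Claim_ definition above) =====
theorem find_regard_scope_spec : Claim_equal_find_regard_scope := by
  intro lines ss es _ hpre
  have hp : ∀ l ∈ lines, ¬(PySem.Str.isIn ss l = true ∧ PySem.Str.isIn es l = true) := by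
    intro l hl ⟨h1, h2⟩
    have := List.all_eq_true.mp hpre l hl
    simp only [h1, h2, Bool.and_self, Bool.not_true] at this
    exact Bool.false_ne_true this
  unfold Spec_find_regard_scope find_regard_scope find_regard_scope_alt
  rw [loopA_char, findEndB_char, fe'_eq_fe ss es lines hp]
  rcases hfe : fe ss es lines with _ | e
  · simp only [Option.elim_none, Option.getD_none, List.take_length]
    split_ifs with h
    · rw [lastStartB_char]
      rcases hls : ls ss lines with _ | j
      · rfl
      · simp only [Option.elim_some, zero_add]
    · simp at h
  · simp only [Option.elim_some, Option.getD_some, zero_add]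
    split_ifs with h1 h2 <;>
      first
      | exact absurd ‹((e : Nat) : Int) = -1› (by omega)
      | exact (‹False›).elim
      | rw [PySem.List.slice_to_natCast, lastStartB_char]
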